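-- pv_equiv track=rewrite | github.com/bogoconic1/pii-detection-1st-place | train_exp073.py | get_parameters_groups
-- ===== SOURCE A (Python) =====
-- import math
--
-- def get_parameters_groups(n_layers, n_groups):
--     layers = [f'backbone.encoder.layer.{n_layers - i - 1}.' for i in range(n_layers)]
--     step = math.ceil(n_layers / n_groups)
--     groups = []
--     for i in range(0, n_layers, step):
--         if i + step >= n_layers - 1:
--             group = layers[i:]
--             groups.append(group)
--             break
--         else:
--             group = layers[i:i + step]
--             groups.append(group)
--     return groups
-- ===== SOURCE B (Python) =====
-- import math
--
-- def get_parameters_groups(n_layers, n_groups):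
--     names = [f'backbone.encoder.layer.{j}.' for j in range(n_layers)]
--     names.reverse()
--     step = math.ceil(n_layers / n_groups)
--     groups = []
--     for j, name in enumerate(names):
--         if j % step == 0:
--             groups.append([])
--         groups[-1].append(name)
--     if len(groups) > 1 and len(groups[-1]) == 1:
--         last = groups.pop()
--         groups[-1].extend(last)
--     return groups
-- ===== Notes on version B (the rewrite author's own statement) =====
-- stated objective: alternative
-- what changed: Replaces A's index loop over range(0,n,step) that slices layers[i:i+step] with break-based orphan absorption by a slice-free single pass: build the names forward and reverse, distribute elements one at a time into groups (a new group opens when j % step == 0), then a separate post-pass merges a trailing one-element group into its predecessor.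
-- outside the precondition, e.g. on get_parameters_groups(-5, 5): A returns [[]], B returns []
import Mathlib
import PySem

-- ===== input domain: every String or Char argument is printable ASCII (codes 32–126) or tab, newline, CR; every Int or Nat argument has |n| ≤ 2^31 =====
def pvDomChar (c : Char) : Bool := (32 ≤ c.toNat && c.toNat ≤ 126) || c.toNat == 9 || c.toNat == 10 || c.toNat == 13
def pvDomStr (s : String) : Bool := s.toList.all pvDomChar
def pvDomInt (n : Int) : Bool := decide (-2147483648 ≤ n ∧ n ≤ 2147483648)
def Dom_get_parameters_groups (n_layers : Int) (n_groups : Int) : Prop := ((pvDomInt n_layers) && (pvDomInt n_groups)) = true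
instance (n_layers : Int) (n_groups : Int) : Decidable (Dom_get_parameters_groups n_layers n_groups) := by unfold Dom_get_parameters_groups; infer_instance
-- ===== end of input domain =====

-- B builds the layer names forward then reverses, and replaces A's slicing loop over
-- range(0, n, step) by a slice-free single pass that distributes the elements one at a time into
-- groups (a new group opens when j % step == 0), followed by a separate post-pass that merges a
-- trailing one-element group into its predecessor (objective: alternative decomposition).

-- ===== PORT A =====
-- layers = [f'backbone.encoder.layer.{n_layers - i - 1}.' for i in range(n_layers)]
def pvLayers (n_layers : Int) : List String :=
  (PySem.List.pyRange 0 n_layers 1).map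
    (fun i => "backbone.encoder.layer." ++ PySem.Int.toStr (n_layers - i - 1) ++ ".")

-- math.ceil(a / b): exact integer ceiling; exact for the Python float expression on Dom, since
-- |a| ≤ 2^31 < 2^53 makes the correctly-rounded double quotient's error < 1/|b|, too small to cross an integer
def pvCeil (a : Int) (b : Int) : Int := -(PySem.Int.floordiv (-a) b)

-- the 'for i in range(0, n_layers, step)' loop with its early break
def pvLoopA (layers : List String) (n_layers : Int) (step : Int) :
    List Int → List (List String) → List (List String)
  | [], groups => groups
  | i :: rest, groups =>
      if n_layers - 1 ≤ i + step then
        groups ++ [PySem.List.slice layers (some i) none]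
      else
        pvLoopA layers n_layers step rest (groups ++ [PySem.List.slice layers (some i) (some (i + step))])

def get_parameters_groups (n_layers : Int) (n_groups : Int) : List (List String) :=
  let layers := pvLayers n_layers
  let step := pvCeil n_layers n_groups
  pvLoopA layers n_layers step (PySem.List.pyRange 0 n_layers step) []

-- ===== PORT B =====
-- names = [f'backbone.encoder.layer.{j}.' for j in range(n_layers)]; names.reverse()
def pvNames (n_layers : Int) : List String :=
  ((PySem.List.pyRange 0 n_layers 1).map
    (fun j => "backbone.encoder.layer." ++ PySem.Int.toStr j ++ ".")).reverse

-- groups[-1].append(name); the [] default of getLastD is unreachable in Python inside Pre_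
-- (j = 0 always opens a group first)
def pvAppendLast (groups : List (List String)) (name : String) : List (List String) :=
  groups.dropLast ++ [groups.getLastD [] ++ [name]]

-- for j, name in enumerate(names): if j % step == 0: groups.append([]); groups[-1].append(name)
def pvDistrib (step : Int) : List (Int × String) → List (List String) → List (List String)
  | [], groups => groups
  | (j, name) :: rest, groups =>
      pvDistrib step rest
        (pvAppendLast (if PySem.Int.mod j step = 0 then groups ++ [[]] else groups) name)

-- if len(groups) > 1 and len(groups[-1]) == 1: last = groups.pop(); groups[-1].extend(last)
def pvMergeOrphan (groups : List (List String)) : List (List String) :=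
  if 1 < groups.length ∧ (groups.getLastD []).length = 1 then
    groups.dropLast.dropLast ++ [groups.dropLast.getLastD [] ++ groups.getLastD []]
  else groups

def get_parameters_groups_alt (n_layers : Int) (n_groups : Int) : List (List String) :=
  let names := pvNames n_layers
  let step := pvCeil n_layers n_groups
  pvMergeOrphan (pvDistrib step (PySem.List.enumerate names 0) [])

-- ===== PRECONDITION & SPEC =====
-- Pre_ restricts to same-sign arguments: n_groups = 0 raises ZeroDivisionError, step = 0 makes
-- range(0, n, 0) raise ValueError, and on the remaining mixed-sign corners A's value — [] from an
-- empty negative-step range, or [[]] from slicing an empty list — is an accident of its loop,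
-- where B returns its natural grouping instead.
def Pre_get_parameters_groups (n_layers : Int) (n_groups : Int) : Prop :=
  (0 < n_layers ∧ 0 < n_groups) ∨ (n_layers < 0 ∧ n_groups < 0)
instance (n_layers : Int) (n_groups : Int) : Decidable (Pre_get_parameters_groups n_layers n_groups) := by
  unfold Pre_get_parameters_groups; infer_instance

def pvWitness_get_parameters_groups : Int × Int := (5, 2)

def Spec_get_parameters_groups (n_layers : Int) (n_groups : Int) (out : List (List String)) : Prop :=
  out = get_parameters_groups_alt n_layers n_groups
instance (n_layers : Int) (n_groups : Int) (out : List (List String)) : Decidable (Spec_get_parameters_groups n_layers n_groups out) := by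
  unfold Spec_get_parameters_groups; infer_instance

-- ===== CLAIM =====
def Claim_equal_get_parameters_groups : Prop :=
  ∀ (n_layers : Int) (n_groups : Int), Dom_get_parameters_groups n_layers n_groups →
    Pre_get_parameters_groups n_layers n_groups →
    Spec_get_parameters_groups n_layers n_groups (get_parameters_groups n_layers n_groups)

-- ===== LEMMAS AND PROOFS =====

-- range with a positive step: nil / cons forms
theorem pvRange_pos_nil {a b s : Int} (hs : 0 < s) (h : b ≤ a) :
    PySem.List.pyRange a b s = [] := by
  rw [PySem.List.pyRange_of_pos a b hs]
  simp [show ¬ a < b by omega]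

theorem pvRange_pos_cons {a b s : Int} (hs : 0 < s) (h : a < b) :
    PySem.List.pyRange a b s = a :: PySem.List.pyRange (a + s) b s := by
  rw [PySem.List.pyRange_of_pos a b hs, PySem.List.pyRange_of_pos (a + s) b hs]
  by_cases h2 : a + s < b
  · have key : b - a + s - 1 = (b - (a + s) + s - 1) + 1 * s := by ring
    have : (b - a + s - 1) / s = (b - (a + s) + s - 1) / s + 1 := by
      rw [key, Int.add_mul_ediv_right _ _ (by omega)]
    rw [if_pos h, if_pos h2, this]
    have hq : 0 ≤ (b - (a + s) + s - 1) / s := by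
      apply Int.ediv_nonneg <;> omega
    rw [show ((b - (a + s) + s - 1) / s + 1).toNat = ((b - (a + s) + s - 1) / s).toNat + 1 by omega]
    rw [List.range_succ_eq_map]
    simp only [List.map_cons, List.map_map]
    refine congrArg₂ (· :: ·) (by simp) ?_
    apply List.map_congr_left
    intro k _
    simp only [Function.comp_apply]
    push_cast [Nat.succ_eq_add_one]
    ring
  · have h1 : 1 ≤ (b - a + s - 1) / s := by
      rw [Int.le_ediv_iff_mul_le (by omega)]; omega
    have h2' : (b - a + s - 1) / s < 2 := by
      rw [Int.ediv_lt_iff_lt_mul (by omega)]; omega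
    rw [if_pos h, if_neg h2]
    have : ((b - a + s - 1) / s).toNat = 1 := by omega
    rw [this]
    simp

-- the ceiling is ≥ 1 when numerator and denominator are both positive / both negative
theorem pvCeil_pos_of_pos {n g : Int} (hn : 0 < n) (hg : 0 < g) : 1 ≤ pvCeil n g := by
  unfold pvCeil
  have h := (PySem.Int.le_floordiv_iff_mul_le (a := -n) (q := 0) hg)
  have : ¬ (0 ≤ PySem.Int.floordiv (-n) g) := by
    rw [h]; omega
  omega

theorem pvCeil_pos_of_neg {n g : Int} (hn : n < 0) (hg : g < 0) : 1 ≤ pvCeil n g := by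
  unfold pvCeil
  rw [show (-n) = -(n) by ring, show g = -(-g) by ring, PySem.Int.floordiv_neg_neg]
  have h := (PySem.Int.le_floordiv_iff_mul_le (a := n) (b := -g) (q := 0) (by omega))
  have : ¬ (0 ≤ PySem.Int.floordiv n (-g)) := by
    rw [h]; omega
  omega

-- accumulator comes out of pvLoopA
theorem pvLoopA_acc (layers : List String) (n s : Int) (r : List Int) (acc : List (List String)) :
    pvLoopA layers n s r acc = acc ++ pvLoopA layers n s r [] := by
  induction r generalizing acc with
  | nil => simp [pvLoopA]
  | cons i rest ih =>
      simp only [pvLoopA]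
      split
      · simp
      · rw [ih, ih (([] : List (List String)) ++ _)]
        simp

-- the two name lists coincide
theorem pvNames_eq_pvLayers (n : Int) : pvNames n = pvLayers n := by
  unfold pvNames pvLayers
  by_cases hn : 0 < n
  · rw [show n = ((n.toNat : Nat) : Int) by omega, PySem.List.pyRange_zero_natCast]
    set m := n.toNat with hm
    apply List.ext_getElem
    · simp
    · intro k h1 h2
      simp only [List.length_reverse, List.length_map, List.length_range] at h1
      rw [List.getElem_reverse]
      simp only [List.getElem_map, List.getElem_range, List.length_map, List.length_range]
      have : ((m : Int)) - (k : Int) - 1 = ((m - 1 - k : Nat) : Int) := by omega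
      rw [this]
  · rw [pvRange_pos_nil (by omega) (by omega)]
    simp

-- proof-side view of the result: plain chunks of length s (fuel = recursion depth bound)
def pvPlainChunk (s : Int) : Nat → List String → List (List String)
  | 0, _ => []
  | f + 1, L =>
      if L = [] then []
      else if (L.length : Int) ≤ s then [L]
      else L.take s.toNat :: pvPlainChunk s f (L.drop s.toNat)

theorem pvPlainChunk_nil (s : Int) (f : Nat) : pvPlainChunk s f [] = [] := by
  cases f <;> simp [pvPlainChunk]

theorem pvPlainChunk_fuel (s : Int) (hs : 1 ≤ s) :
    ∀ (f f' : Nat) (L : List String), L.length ≤ f → L.length ≤ f' →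
      pvPlainChunk s f L = pvPlainChunk s f' L := by
  intro f
  induction f with
  | zero =>
      intro f' L h _
      have : L = [] := by cases L <;> simp_all
      rw [this, pvPlainChunk_nil, pvPlainChunk_nil]
  | succ f ih =>
      intro f' L h h'
      cases L with
      | nil => rw [pvPlainChunk_nil, pvPlainChunk_nil]
      | cons x t =>
          obtain ⟨f'', rfl⟩ : ∃ k, f' = k + 1 := ⟨f' - 1, by simp at h'; omega⟩
          simp only [pvPlainChunk, if_neg (List.cons_ne_nil x t)]
          split
          · rfl
          · refine congrArg₂ (· :: ·) rfl (ih f'' _ ?_ ?_) <;>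
              · rw [List.length_drop]
                simp at h h' ⊢
                omega

-- mod steps by one: cyclic successor
theorem pvMod_succ {i s : Int} (hs : 0 < s) :
    PySem.Int.mod (i + 1) s = if PySem.Int.mod i s = s - 1 then 0 else PySem.Int.mod i s + 1 := by
  rw [PySem.Int.mod_eq_emod_of_pos hs, PySem.Int.mod_eq_emod_of_pos hs]
  have h0 : 0 ≤ i % s := Int.emod_nonneg _ (by omega)
  have h1 : i % s < s := Int.emod_lt_of_pos _ hs
  have key : (i + 1) % s = (i % s + 1) % s := by
    conv_lhs => rw [show i + 1 = i % s + 1 + s * (i / s) by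
      have := Int.emod_add_mul_ediv i s; omega]
    rw [Int.add_mul_emod_self_left]
  rw [key]
  split
  · rename_i hcase
    rw [hcase]
    simp
  · exact Int.emod_eq_of_lt (by omega) (by omega)

theorem pvMod_bounds {i s : Int} (hs : 0 < s) :
    0 ≤ PySem.Int.mod i s ∧ PySem.Int.mod i s < s := by
  rw [PySem.Int.mod_eq_emod_of_pos hs]
  exact ⟨Int.emod_nonneg _ (by omega), Int.emod_lt_of_pos _ hs⟩

theorem pvAppendLast_concat (G : List (List String)) (g : List String) (x : String) :
    pvAppendLast (G ++ [g]) x = G ++ [g ++ [x]] := by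
  unfold pvAppendLast
  rw [List.dropLast_concat, List.getLastD_concat]

-- distribution characterised: starting at a block boundary it produces the plain chunks;
-- mid-block it first fills the open group to the boundary
theorem pvDistrib_main (s : Int) (hs : 1 ≤ s) (L : List String) :
    ∀ (i : Int) (f : Nat), L.length ≤ f →
      ((PySem.Int.mod i s = 0 → ∀ G,
          pvDistrib s (PySem.List.enumerate L i) G = G ++ pvPlainChunk s f L) ∧
       (PySem.Int.mod i s ≠ 0 → ∀ g G,
          pvDistrib s (PySem.List.enumerate L i) (G ++ [g]) =
            G ++ (g ++ L.take (s - PySem.Int.mod i s).toNat) ::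
              pvPlainChunk s f (L.drop (s - PySem.Int.mod i s).toNat))) := by
  induction L with
  | nil =>
      intro i f hf
      constructor
      · intro _ G
        simp [PySem.List.enumerate_nil, pvDistrib, pvPlainChunk_nil]
      · intro _ g G
        simp [PySem.List.enumerate_nil, pvDistrib, pvPlainChunk_nil]
  | cons x L' ih =>
      intro i f hf
      obtain ⟨f', rfl⟩ : ∃ k, f = k + 1 := ⟨f - 1, by simp at hf; omega⟩
      have hf' : L'.length ≤ f' := by simp at hf; omega
      have hb := pvMod_bounds (i := i) (show (0:Int) < s by omega)
      have hsucc := pvMod_succ (i := i) (show (0:Int) < s by omega)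
      have hb' := pvMod_bounds (i := i + 1) (show (0:Int) < s by omega)
      constructor
      · intro h0 G
        rw [PySem.List.enumerate_cons]
        simp only [pvDistrib, if_pos h0, pvAppendLast_concat, List.nil_append]
        rw [h0] at hsucc
        by_cases hs1 : s = 1
        · -- s = 1: next index is again at a block boundary
          have hm1 : PySem.Int.mod (i + 1) s = 0 := by
            rw [hsucc]; simp [hs1]
          rw [(ih (i + 1) f' hf').1 hm1 (G ++ [[x]])]
          cases L' with
          | nil =>
              rw [pvPlainChunk_nil]
              simp [pvPlainChunk, hs1]
          | cons y t =>
              simp only [pvPlainChunk, if_neg (List.cons_ne_nil x (y :: t))]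
              rw [if_neg (by simp [hs1])]
              rw [show s.toNat = 1 by omega]
              simp
        · -- s > 1: next index is mid-block with remainder 1
          have hm1 : PySem.Int.mod (i + 1) s = 1 := by
            rw [hsucc, if_neg (by omega)]
            omega
          rw [(ih (i + 1) f' hf').2 (by rw [hm1]; omega) [x] G]
          rw [hm1]
          simp only [pvPlainChunk, if_neg (List.cons_ne_nil x L')]
          by_cases hshort : ((x :: L').length : Int) ≤ s
          · rw [if_pos hshort]
            have htk : L'.take (s - 1).toNat = L' := by
              apply List.take_of_length_le
              simp at hshort
              omega
            have hdp : L'.drop (s - 1).toNat = [] := by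
              apply List.drop_eq_nil_of_le
              simp at hshort
              omega
            rw [htk, hdp, pvPlainChunk_nil]
            simp
          · rw [if_neg hshort]
            have hto : s.toNat = (s - 1).toNat + 1 := by omega
            rw [hto, List.take_succ_cons, List.drop_succ_cons]
            simp
      · intro h0 g G
        rw [PySem.List.enumerate_cons]
        simp only [pvDistrib, if_neg h0, pvAppendLast_concat]
        by_cases hlast : PySem.Int.mod i s = s - 1
        · -- the element closes the open group
          have hm1 : PySem.Int.mod (i + 1) s = 0 := by rw [hsucc, if_pos hlast]
          rw [(ih (i + 1) f' hf').1 hm1 (G ++ [g ++ [x]])]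
          rw [hlast, show (s - (s - 1)).toNat = 1 by omega]
          rw [List.take_succ_cons, List.drop_succ_cons, List.take_zero, List.drop_zero]
          rw [pvPlainChunk_fuel s hs (f' + 1) f' L' (by simp at hf; omega) hf']
          simp
        · -- the element stays mid-block
          have hm1 : PySem.Int.mod (i + 1) s = PySem.Int.mod i s + 1 := by
            rw [hsucc, if_neg hlast]
          rw [(ih (i + 1) f' hf').2 (by rw [hm1]; omega) (g ++ [x]) G]
          rw [hm1]
          have hto : (s - PySem.Int.mod i s).toNat = (s - (PySem.Int.mod i s + 1)).toNat + 1 := by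
            omega
          rw [hto, List.take_succ_cons, List.drop_succ_cons]
          rw [pvPlainChunk_fuel s hs (f' + 1) f' (L'.drop (s - (PySem.Int.mod i s + 1)).toNat)
            (by rw [List.length_drop]; omega) (by rw [List.length_drop]; omega)]
          simp

-- getLastD of a nonempty list ignores the default
theorem pvGetLastD_irrel {α : Type} (u : α) (v : List α) (a b : α) :
    (u :: v).getLastD a = (u :: v).getLastD b := by
  rw [List.getLastD_cons, List.getLastD_cons]

-- the orphan merge commutes with a leading chunk when the tail cannot itself be a lone singleton
theorem pvMergeOrphan_cons (c : List String) (cs : List (List String)) (hne : cs ≠ [])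
    (h1 : cs.length = 1 → (cs.getLastD []).length ≠ 1) :
    pvMergeOrphan (c :: cs) = c :: pvMergeOrphan cs := by
  obtain ⟨d, cs', rfl⟩ : ∃ d cs', cs = d :: cs' := by
    cases cs with
    | nil => exact absurd rfl hne
    | cons d cs' => exact ⟨d, cs', rfl⟩
  unfold pvMergeOrphan
  cases cs' with
  | nil =>
      have hd : d.length ≠ 1 := by simpa using h1 rfl
      rw [if_neg (by
        intro hx
        exact hd (by simpa [List.getLastD_cons] using hx.2))]
      rw [if_neg (by simp)]
  | cons e cs'' =>
      have hgl : (c :: d :: e :: cs'').getLastD [] = (d :: e :: cs'').getLastD [] := by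
        rw [List.getLastD_cons]
        exact pvGetLastD_irrel d (e :: cs'') c []
      by_cases hlen : ((d :: e :: cs'').getLastD []).length = 1
      · rw [if_pos ⟨by simp, by rw [hgl]; exact hlen⟩, if_pos ⟨by simp, hlen⟩]
        have hdl' : (d :: e :: cs'').dropLast ≠ [] := by
          simp [List.dropLast_cons_of_ne_nil]
        rw [show (c :: d :: e :: cs'').dropLast = c :: (d :: e :: cs'').dropLast from
          List.dropLast_cons_of_ne_nil (by simp)]
        rw [List.dropLast_cons_of_ne_nil hdl']
        rw [List.getLastD_cons]
        obtain ⟨u, v, huv⟩ : ∃ u v, (d :: e :: cs'').dropLast = u :: v := by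
          cases hx : (d :: e :: cs'').dropLast with
          | nil => exact absurd hx hdl'
          | cons u v => exact ⟨u, v, rfl⟩
        rw [huv, pvGetLastD_irrel u v c [], hgl]
        simp
      · rw [if_neg (by
          intro hx
          exact hlen (by rw [← hgl]; exact hx.2))]
        rw [if_neg (fun hx => hlen hx.2)]

-- a plain chunking of a nonempty list is nonempty
theorem pvPlainChunk_ne_nil (s : Int) (f : Nat) (L : List String) (hL : L ≠ []) (hf : 1 ≤ f) :
    pvPlainChunk s f L ≠ [] := by
  obtain ⟨k, rfl⟩ : ∃ k, f = k + 1 := ⟨f - 1, by omega⟩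
  simp only [pvPlainChunk, if_neg hL]
  split <;> simp

-- A's loop from start index i equals the merged plain chunking of the i-th suffix
theorem pvLoopEq (L : List String) (n s : Int) (hs : 1 ≤ s) (hL : L.length = n.toNat)
    (i : Int) (h0 : 0 ≤ i) (h1 : i < n) (f : Nat) (hf : (n - i).toNat ≤ f) :
    pvLoopA L n s (PySem.List.pyRange i n s) [] =
      pvMergeOrphan (pvPlainChunk s f (L.drop i.toNat)) := by
  have hRlen : (L.drop i.toNat).length = (n - i).toNat := by
    rw [List.length_drop, hL]; omega
  have hRne : L.drop i.toNat ≠ [] := by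
    intro hx; rw [hx] at hRlen; simp at hRlen; omega
  obtain ⟨f', rfl⟩ : ∃ k, f = k + 1 := ⟨f - 1, by omega⟩
  rw [pvRange_pos_cons (by omega) h1]
  by_cases hbr : n - 1 ≤ i + s
  · simp only [pvLoopA, if_pos hbr, List.nil_append]
    rw [PySem.List.slice_from L h0]
    by_cases hsmall : (((L.drop i.toNat).length : Nat) : Int) ≤ s
    · -- a single chunk, nothing to merge
      simp only [pvPlainChunk, if_neg hRne, if_pos hsmall]
      unfold pvMergeOrphan
      rw [if_neg (by simp)]
    · -- exactly s + 1 elements left: plain chunking leaves an orphan, the merge reunites them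
      have hlen : (((L.drop i.toNat).length : Nat) : Int) = s + 1 := by
        rw [hRlen]; omega
      simp only [pvPlainChunk, if_neg hRne, if_neg hsmall]
      have hdne : (L.drop i.toNat).drop s.toNat ≠ [] := by
        intro hx
        have := congrArg List.length hx
        rw [List.length_drop, hRlen] at this
        simp at this
        omega
      have hdlen : ((L.drop i.toNat).drop s.toNat).length = 1 := by
        rw [List.length_drop, hRlen]; omega
      have htailchunk : pvPlainChunk s f' ((L.drop i.toNat).drop s.toNat) =
          [(L.drop i.toNat).drop s.toNat] := by
        obtain ⟨f'', rfl⟩ : ∃ k, f' = k + 1 := ⟨f' - 1, by omega⟩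
        simp only [pvPlainChunk, if_neg hdne]
        rw [if_pos (by rw [hdlen]; omega)]
      rw [htailchunk]
      unfold pvMergeOrphan
      rw [if_pos ⟨by simp, by simp only [List.getLastD_cons, List.getLastD_nil]; exact hdlen⟩]
      simp
  · -- regular chunk, then recurse
    have hlt : i + s < n := by omega
    simp only [pvLoopA, if_neg hbr, List.nil_append]
    rw [pvLoopA_acc]
    rw [pvLoopEq L n s hs hL (i + s) (by omega) hlt f' (by omega)]
    have hhead : PySem.List.slice L (some i) (some (i + s)) = (L.drop i.toNat).take s.toNat := by
      rw [PySem.List.slice_toNat L h0 (by omega)]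
      rw [show (i + s).toNat - i.toNat = s.toNat by omega]
    have htail : (L.drop i.toNat).drop s.toNat = L.drop (i + s).toNat := by
      rw [List.drop_drop]
      rw [show i.toNat + s.toNat = (i + s).toNat by omega]
    have hRlen' : ((L.drop (i + s).toNat).length : Int) = n - i - s := by
      rw [List.length_drop, hL]; omega
    have hne' : L.drop (i + s).toNat ≠ [] := by
      intro hx; rw [hx] at hRlen'; simp at hRlen'; omega
    have hbig : ¬ (((L.drop i.toNat).length : Nat) : Int) ≤ s := by
      rw [hRlen]; omega
    simp only [pvPlainChunk, if_neg hRne, if_neg hbig]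
    rw [htail]
    have hcs : pvPlainChunk s f' (L.drop (i + s).toNat) ≠ [] :=
      pvPlainChunk_ne_nil s f' _ hne' (by omega)
    -- if the tail chunking is a single chunk, that chunk is the whole ≥ 2-element suffix
    have h1cond : (pvPlainChunk s f' (L.drop (i + s).toNat)).length = 1 →
        ((pvPlainChunk s f' (L.drop (i + s).toNat)).getLastD []).length ≠ 1 := by
      intro hlen1
      obtain ⟨f'', rfl⟩ : ∃ k, f' = k + 1 := ⟨f' - 1, by omega⟩
      by_cases hsm : (((L.drop (i + s).toNat).length : Nat) : Int) ≤ s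
      · simp only [pvPlainChunk, if_neg hne', if_pos hsm]
        simp only [List.getLastD_cons, List.getLastD_nil]
        omega
      · exfalso
        have hdd : (L.drop (i + s).toNat).drop s.toNat ≠ [] := by
          intro hx
          have := congrArg List.length hx
          rw [List.length_drop] at this
          simp at this
          omega
        simp only [pvPlainChunk, if_neg hne', if_neg hsm, List.length_cons] at hlen1
        have hz : pvPlainChunk s f'' ((L.drop (i + s).toNat).drop s.toNat) = [] :=
          List.eq_nil_of_length_eq_zero (by omega)
        exact pvPlainChunk_ne_nil s f'' _ hdd (by omega) hz
    rw [pvMergeOrphan_cons _ _ hcs h1cond, hhead]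
    simp
  termination_by (n - i).toNat
  decreasing_by omega

-- ===== VERDICT =====
theorem get_parameters_groups_spec : Claim_equal_get_parameters_groups := by
  intro n g _ hpre
  unfold Spec_get_parameters_groups get_parameters_groups get_parameters_groups_alt
  rw [pvNames_eq_pvLayers]
  show pvLoopA (pvLayers n) n (pvCeil n g) (PySem.List.pyRange 0 n (pvCeil n g)) [] =
    pvMergeOrphan (pvDistrib (pvCeil n g) (PySem.List.enumerate (pvLayers n) 0) [])
  have hL : (pvLayers n).length = n.toNat := by
    unfold pvLayers
    rw [List.length_map, PySem.List.length_pyRange_one]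
    omega
  rcases hpre with ⟨hn, hg⟩ | ⟨hn, hg⟩
  · have hs : 1 ≤ pvCeil n g := pvCeil_pos_of_pos hn hg
    have hmod0 : PySem.Int.mod 0 (pvCeil n g) = 0 := by
      rw [PySem.Int.mod_eq_emod_of_pos (by omega)]
      simp
    rw [(pvDistrib_main (pvCeil n g) hs (pvLayers n) 0 (pvLayers n).length le_rfl).1 hmod0 []]
    rw [List.nil_append]
    have := pvLoopEq (pvLayers n) n (pvCeil n g) hs hL 0 le_rfl hn (pvLayers n).length
      (by omega)
    simpa using this
  · have hs : 1 ≤ pvCeil n g := pvCeil_pos_of_neg hn hg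
    rw [pvRange_pos_nil (by omega) (by omega)]
    have hnil : pvLayers n = [] := by
      have := hL
      rw [show n.toNat = 0 by omega] at this
      exact List.eq_nil_of_length_eq_zero this
    rw [hnil]
    simp [pvLoopA, PySem.List.enumerate_nil, pvDistrib, pvMergeOrphan]
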